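-- pv_equiv track=rewrite | github.com/lty12b9b0a1/SKEL | benchmarks_new/toml/source.py | bounded_string
-- ===== SOURCE A (Python) =====
-- def bounded_string(s):
--     if len(s) == 0:
--         return True
--     if s[-1] != s[0]:
--         return False
--     i = -2
--     backslash = False
--     while len(s) + i > 0:
--         if s[i] == "\\":
--             backslash = not backslash
--             i -= 1
--         else:
--             break
--     return not backslash
-- ===== SOURCE B (Python) =====
-- def bounded_string(s):
--     if len(s) == 0:
--         return True
--     if s[-1] != s[0]:
--         return False
--     even = True
--     for c in s[1:-1]:
--         even = (not even) if c == "\\" else True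
--     return even
-- ===== Notes on version B (the rewrite author's own statement) =====
-- stated objective: alternative
-- what changed: Replaces A's backward index walk over only the trailing backslash run (with early break) by a single forward pass over the whole middle s[1:-1] maintaining an escape-parity flag that is toggled on backslash and reset on any other character.
import Mathlib
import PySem

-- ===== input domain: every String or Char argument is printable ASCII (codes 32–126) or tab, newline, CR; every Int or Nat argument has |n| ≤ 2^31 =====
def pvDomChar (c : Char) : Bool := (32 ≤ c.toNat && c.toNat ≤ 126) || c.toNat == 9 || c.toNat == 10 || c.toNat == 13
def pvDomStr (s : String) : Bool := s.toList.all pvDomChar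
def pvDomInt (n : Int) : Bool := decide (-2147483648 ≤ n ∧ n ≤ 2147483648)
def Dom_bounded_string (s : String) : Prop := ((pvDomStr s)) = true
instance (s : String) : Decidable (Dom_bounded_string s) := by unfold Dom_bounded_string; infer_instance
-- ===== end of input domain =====

-- B replaces A's backward index walk over the trailing backslash run by a single
-- forward pass over the whole middle s[1:-1] with an escape-parity flag
-- (toggled on backslash, reset on anything else); objective: alternative.

-- ===== PORT A =====
-- the while-loop of A: i starts at -2; state 'backslash'; returns the final 'backslash'
def pvLoopA (cs : List Char) (i : Int) (b : Bool) : Bool :=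
  if _h : 0 < (cs.length : Int) + i then
    if PySem.List.pyGet? cs i = some '\\' then pvLoopA cs (i - 1) (!b) else b
  else b
termination_by ((cs.length : Int) + i).toNat
decreasing_by omega

def bounded_string (s : String) : Bool :=
  let cs := s.toList
  if cs.length = 0 then true
  else if PySem.List.pyGet? cs (-1) ≠ PySem.List.pyGet? cs 0 then false
  else !(pvLoopA cs (-2) false)

-- ===== PORT B =====
def bounded_string_alt (s : String) : Bool :=
  let cs := s.toList
  if cs.length = 0 then true
  else if PySem.List.pyGet? cs (-1) ≠ PySem.List.pyGet? cs 0 then false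
  else
    -- for c in s[1:-1]: even = (not even) if c == "\\" else True
    (PySem.List.slice cs (some 1) (some (-1))).foldl
      (fun even c => if c == '\\' then !even else true) true

-- ===== PRECONDITION & SPEC =====
def Spec_bounded_string (s : String) (out : Bool) : Prop := out = bounded_string_alt s
instance (s : String) (out : Bool) : Decidable (Spec_bounded_string s out) := by unfold Spec_bounded_string; infer_instance

-- ===== CLAIM (what is proved, stated in full; the proofs are below) =====
def Claim_equal_bounded_string : Prop := ∀ (s : String), Dom_bounded_string s → Spec_bounded_string s (bounded_string s)

-- ===== LEMMAS AND PROOFS =====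

-- parity of the leading backslash run, as computed by A's loop read backwards
def pvParity (m : List Char) (b : Bool) : Bool :=
  match m with
  | [] => b
  | c :: t => if c == '\\' then pvParity t (!b) else b

theorem pvParity_eq (m : List Char) (b : Bool) :
    pvParity m b = (b != decide ((m.takeWhile (· == '\\')).length % 2 = 1)) := by
  induction m generalizing b with
  | nil => simp [pvParity]
  | cons c t ih =>
    by_cases hc : c == '\\'
    · simp only [pvParity, hc, if_pos, List.takeWhile_cons, List.length_cons, ih]
      rcases Nat.mod_two_eq_zero_or_one (List.takeWhile (fun x => x == '\\') t).length with h | h <;>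
        cases b <;> simp [Nat.add_mod, h]
    · simp [pvParity, hc]

theorem pvGet_neg (cs : List Char) (i : Int) (h1 : 0 ≤ (cs.length : Int) + i) (h2 : i < 0) :
    PySem.List.pyGet? cs i = cs[((cs.length : Int) + i).toNat]? := by
  unfold PySem.List.pyGet? PySem.List.pyIdx?
  rw [if_neg (by omega), if_pos (by omega)]
  have : cs.length - (-i).toNat = ((cs.length : Int) + i).toNat := by omega
  rw [this, Option.bind_some]

theorem pvLoopA_eq (cs : List Char) (n : Nat) :
    ∀ (i : Int) (b : Bool), i ≤ -1 → ((cs.length : Int) + i).toNat = n →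
      pvLoopA cs i b = pvParity (((cs.take (n + 1)).drop 1).reverse) b := by
  induction n with
  | zero =>
    intro i b hi hn
    rw [pvLoopA]
    rw [dif_neg (by omega)]
    have h : (cs.take 1).drop 1 = [] := by
      cases cs <;> simp
    rw [h]; rfl
  | succ n ih =>
    intro i b hi hn
    have hp : 0 < (cs.length : Int) + i := by omega
    have hlen : n + 2 ≤ cs.length := by omega
    rw [pvLoopA, dif_pos hp]
    have hget : PySem.List.pyGet? cs i = some cs[n + 1] := by
      rw [pvGet_neg cs i (by omega) (by omega), hn]
      exact List.getElem?_eq_getElem (by omega)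
    have htake : cs.take (n + 2) = cs.take (n + 1) ++ [cs[n + 1]] := by
      rw [List.take_add_one]
      simp [List.getElem?_eq_getElem (show n + 1 < cs.length by omega)]
    have hdrop : ((cs.take (n + 2)).drop 1).reverse
        = cs[n + 1] :: ((cs.take (n + 1)).drop 1).reverse := by
      rw [htake, List.drop_append_of_le_length (by simp; omega)]
      simp
    rw [hdrop]
    by_cases hc : cs[n + 1] = '\\'
    · rw [if_pos (by rw [hget, hc]), ih (i - 1) (!b) (by omega) (by omega)]
      simp [pvParity, hc]
    · rw [if_neg (by rw [hget]; simpa using hc)]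
      simp [pvParity, hc]

theorem pv_middle (cs : List Char) :
    PySem.List.slice cs (some 1) (some (-1)) = (cs.drop 1).take (cs.length - 2) := by
  rcases Nat.eq_zero_or_pos cs.length with h | h
  · rw [List.eq_nil_of_length_eq_zero h]; rfl
  · simp only [PySem.List.slice, PySem.List.clampIdx]
    rw [if_pos (by norm_num), if_neg (by omega), if_neg (by norm_num)]
    have h1 : min (Int.toNat 1) cs.length = 1 := by simp; omega
    rw [h1]
    congr 1
    omega

-- the forward fold of B computes the negated parity of the trailing backslash run
theorem pvFold_eq (m : List Char) :
    m.foldl (fun even c => if c == '\\' then !even else true) true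
      = !(pvParity m.reverse false) := by
  have key : ∀ (r : List Char),
      r.reverse.foldl (fun even c => if c == '\\' then !even else true) true
        = !(pvParity r false) := by
    intro r
    induction r with
    | nil => rfl
    | cons c t ih =>
      have : (c :: t).reverse = t.reverse ++ [c] := by simp
      rw [this, List.foldl_append, ih]
      by_cases hc : c == '\\'
      · simp only [List.foldl, hc, if_pos, pvParity]
        rw [pvParity_eq, pvParity_eq]
        rcases Nat.mod_two_eq_zero_or_one (t.takeWhile (· == '\\')).length with h | h <;>
          simp [h]
      · simp [List.foldl, hc, pvParity]
  have := key m.reverse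
  rwa [List.reverse_reverse] at this

-- ===== VERDICT (by name: the statement is the Claim_ definition above) =====
theorem bounded_string_spec : Claim_equal_bounded_string := by
  intro s _
  unfold Spec_bounded_string
  have hA : bounded_string s =
      (if s.toList.length = 0 then true
       else if PySem.List.pyGet? s.toList (-1) ≠ PySem.List.pyGet? s.toList 0 then false
       else !(pvLoopA s.toList (-2) false)) := rfl
  have hB : bounded_string_alt s =
      (if s.toList.length = 0 then true
       else if PySem.List.pyGet? s.toList (-1) ≠ PySem.List.pyGet? s.toList 0 then false
       else (PySem.List.slice s.toList (some 1) (some (-1))).foldl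
              (fun even c => if c == '\\' then !even else true) true) := rfl
  rw [hA, hB]
  set cs := s.toList with hcs
  by_cases h0 : cs.length = 0
  · simp [h0]
  · rw [if_neg h0, if_neg h0]
    by_cases hq : PySem.List.pyGet? cs (-1) ≠ PySem.List.pyGet? cs 0
    · rw [if_pos hq, if_pos hq]
    · rw [if_neg hq, if_neg hq]
      set middle := PySem.List.slice cs (some 1) (some (-1)) with hm
      have hA2 : pvLoopA cs (-2) false = pvParity middle.reverse false := by
        rw [pvLoopA_eq cs ((cs.length : Int) + (-2)).toNat (-2) false (by omega) rfl]
        congr 2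
        rw [hm, pv_middle cs]
        rcases Nat.lt_or_ge cs.length 2 with h2 | h2
        · have h3 : ((cs.length : Int) + (-2)).toNat = 0 := by omega
          have hl1 : cs.length = 1 := by omega
          obtain ⟨c, hc⟩ := List.length_eq_one_iff.mp hl1
          rw [h3, hc]
          simp
        · have h3 : ((cs.length : Int) + (-2)).toNat + 1 = cs.length - 1 := by omega
          rw [h3, List.drop_take]
          have h4 : cs.length - 1 - 1 = cs.length - 2 := by omega
          rw [h4]
      rw [hA2, pvFold_eq]
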